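-- pv_equiv track=rewrite | github.com/AI-HealthCare-01/AI_01_04 | app/integrations/ocr/parser.py | _merge_single_char_fields
-- ===== SOURCE A (Python) =====
-- from typing import Any
--
-- def _merge_single_char_fields(fields: list[dict[str, Any]]) -> list[str]:
--     """인접한 단일 문자 필드를 하나의 토큰으로 병합한다.
--
--     예:
--     - I / 1 / 0 / 9 -> I109
--
--     다만 OCR field 순서가 완전히 신뢰되지는 않으므로,
--     이 결과는 참고용 full_text 생성에만 사용하고
--     질병코드 추출의 최우선 근거로 쓰지는 않는다.
--     """
--     result: list[str] = []
--     buf: list[str] = []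
--
--     for field in fields:
--         text = field.get("inferText")
--         if not isinstance(text, str) or not text.strip():
--             if buf:
--                 result.append("".join(buf))
--                 buf = []
--             continue
--
--         stripped = text.strip()
--         if len(stripped) == 1 and stripped.isascii() and stripped.isalnum():
--             buf.append(stripped)
--         else:
--             if buf:
--                 result.append("".join(buf))
--                 buf = []
--             result.append(stripped)
--
--     if buf:
--         result.append("".join(buf))
--
--     return result
-- ===== SOURCE B (Python) =====
-- from typing import Any
--
--
-- def _classify(field: dict[str, Any]) -> tuple[str, Any]:
--     """Tag one field: ('char', c) for a single ascii-alnum char, ('word', s) for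
--     other non-blank text, ('sep', None) for missing/non-str/blank text."""
--     text = field.get("inferText")
--     if not isinstance(text, str):
--         return ("sep", None)
--     s = text.strip()
--     if not s:
--         return ("sep", None)
--     if len(s) == 1 and s.isascii() and s.isalnum():
--         return ("char", s)
--     return ("word", s)
--
--
-- def _merge_single_char_fields(fields: list[dict[str, Any]]) -> list[str]:
--     # two-pass: classify every field, then group consecutive tags
--     toks = [_classify(f) for f in fields]
--     out: list[str] = []
--     i, n = 0, len(toks)
--     while i < n:
--         tag, val = toks[i]
--         if tag == "sep":
--             i += 1
--         elif tag == "word":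
--             out.append(val)
--             i += 1
--         else:  # a maximal run of 'char' tags becomes one joined token
--             j = i
--             while j < n and toks[j][0] == "char":
--                 j += 1
--             out.append("".join(v for _, v in toks[i:j]))
--             i = j
--     return out
-- ===== Notes on version B (the rewrite author's own statement) =====
-- stated objective: alternative
-- what changed: Replaces A's inline buffer/flush state machine with a two-pass shape: first classify every field into char/word/sep tags, then group maximal consecutive char runs into joined tokens.
import Mathlib
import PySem

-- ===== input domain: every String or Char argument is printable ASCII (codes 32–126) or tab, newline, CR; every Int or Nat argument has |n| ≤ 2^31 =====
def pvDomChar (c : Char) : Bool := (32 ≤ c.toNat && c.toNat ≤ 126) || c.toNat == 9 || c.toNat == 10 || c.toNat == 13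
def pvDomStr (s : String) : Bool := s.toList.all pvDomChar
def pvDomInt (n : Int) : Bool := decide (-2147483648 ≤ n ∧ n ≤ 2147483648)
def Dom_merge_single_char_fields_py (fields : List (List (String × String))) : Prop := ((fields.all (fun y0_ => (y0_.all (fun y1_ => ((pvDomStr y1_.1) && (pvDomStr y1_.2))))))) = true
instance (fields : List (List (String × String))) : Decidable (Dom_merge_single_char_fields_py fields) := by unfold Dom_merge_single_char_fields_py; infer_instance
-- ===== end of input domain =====

-- B replaces A's inline buffer/flush state machine with a classify-then-group two-pass shape (alternative decomposition, same cost).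

-- str.isascii(): all code points < 128 (true on ""); exact, PySem has no primitive for it
def pyIsAscii (s : String) : Bool := s.toList.all (fun c => c.toNat ≤ 127)

-- ===== PORT A =====
-- the for-loop of A, carrying its `result` and `buf` lists; the [] case is the trailing `if buf:` flush
def mergeA_loop : List (List (String × String)) → List String → List String → List String
  | [], result, buf => if buf.isEmpty then result else result ++ [PySem.Str.join "" buf]
  | field :: rest, result, buf =>
    match (PySem.Dict.mk field).get? "inferText" with
    | none => mergeA_loop rest (if buf.isEmpty then result else result ++ [PySem.Str.join "" buf]) []
    | some text =>
      if PySem.Str.strip text = "" then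
        mergeA_loop rest (if buf.isEmpty then result else result ++ [PySem.Str.join "" buf]) []
      else
        let stripped := PySem.Str.strip text
        if PySem.Str.len stripped == 1 && pyIsAscii stripped && PySem.Str.strIsalnum stripped then
          mergeA_loop rest result (buf ++ [stripped])
        else
          mergeA_loop rest ((if buf.isEmpty then result else result ++ [PySem.Str.join "" buf]) ++ [stripped]) []

def merge_single_char_fields_py (fields : List (List (String × String))) : List String :=
  mergeA_loop fields [] []

-- ===== PORT B =====
inductive PvTok : Type
  | sep : PvTok
  | ch : String → PvTok
  | word : String → PvTok
deriving DecidableEq, Repr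

-- B's _classify
def pvClassify (field : List (String × String)) : PvTok :=
  match (PySem.Dict.mk field).get? "inferText" with
  | none => PvTok.sep
  | some text =>
    let s := PySem.Str.strip text
    if s = "" then PvTok.sep
    else if PySem.Str.len s == 1 && pyIsAscii s && PySem.Str.strIsalnum s then PvTok.ch s
    else PvTok.word s

-- B's inner while-loop: the maximal leading run of 'char' tags, and the remainder
def pvSpanChars : List PvTok → List String × List PvTok
  | PvTok.ch c :: rest => ((pvSpanChars rest).1.cons c, (pvSpanChars rest).2)
  | ts => ([], ts)

theorem pvSpanChars_len_le : ∀ ts : List PvTok, (pvSpanChars ts).2.length ≤ ts.length := by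
  intro ts
  induction ts with
  | nil => simp [pvSpanChars]
  | cons t rest ih =>
    cases t with
    | sep => simp [pvSpanChars]
    | word w => simp [pvSpanChars]
    | ch c => simpa [pvSpanChars] using Nat.le_succ_of_le ih

-- B's outer while-loop over the tag list
def pvEmit : List PvTok → List String
  | [] => []
  | PvTok.sep :: rest => pvEmit rest
  | PvTok.word w :: rest => w :: pvEmit rest
  | PvTok.ch c :: rest =>
    PySem.Str.join "" (c :: (pvSpanChars rest).1) :: pvEmit (pvSpanChars rest).2
termination_by ts => ts.length
decreasing_by
  all_goals simp
  exact pvSpanChars_len_le rest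

def merge_single_char_fields_py_alt (fields : List (List (String × String))) : List String :=
  pvEmit (fields.map pvClassify)

-- ===== PRECONDITION & SPEC =====
def Spec_merge_single_char_fields_py (fields : List (List (String × String))) (out : List String) : Prop := out = merge_single_char_fields_py_alt fields
instance (fields : List (List (String × String))) (out : List String) : Decidable (Spec_merge_single_char_fields_py fields out) := by unfold Spec_merge_single_char_fields_py; infer_instance

-- ===== CLAIM (what is proved, stated in full; the proofs are below) =====
def Claim_equal_merge_single_char_fields_py : Prop := ∀ (fields : List (List (String × String))), Dom_merge_single_char_fields_py fields → Spec_merge_single_char_fields_py fields (merge_single_char_fields_py fields)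

-- ===== LEMMAS AND PROOFS =====

theorem pvEmit_nil : pvEmit [] = [] := by rw [pvEmit]
theorem pvEmit_sep (rest : List PvTok) : pvEmit (PvTok.sep :: rest) = pvEmit rest := by rw [pvEmit]
theorem pvEmit_word (w : String) (rest : List PvTok) :
    pvEmit (PvTok.word w :: rest) = w :: pvEmit rest := by rw [pvEmit]
theorem pvEmit_ch (c : String) (rest : List PvTok) :
    pvEmit (PvTok.ch c :: rest) =
      PySem.Str.join "" (c :: (pvSpanChars rest).1) :: pvEmit (pvSpanChars rest).2 := by
  rw [pvEmit]

-- a tag list starting with sep/word (or empty) has no leading char run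
theorem pvSpanChars_nonch : ∀ ts : List PvTok,
    (ts = [] ∨ (∃ r, ts = PvTok.sep :: r) ∨ (∃ w r, ts = PvTok.word w :: r)) →
    pvSpanChars ts = ([], ts) := by
  rintro ts (rfl | ⟨r, rfl⟩ | ⟨w, r, rfl⟩) <;> rfl

theorem pvSpanChars_map_append (l : List String) (ts : List PvTok) :
    pvSpanChars (l.map PvTok.ch ++ ts) = (l ++ (pvSpanChars ts).1, (pvSpanChars ts).2) := by
  induction l with
  | nil => simp
  | cons c l ih => simp [pvSpanChars, ih]

-- flushing the pending char buffer: emitting buf-as-chars followed by a non-char-headed tail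
theorem pvEmit_flush (buf : List String) (ts : List PvTok)
    (h : ts = [] ∨ (∃ r, ts = PvTok.sep :: r) ∨ (∃ w r, ts = PvTok.word w :: r)) :
    pvEmit (buf.map PvTok.ch ++ ts) =
      (if buf.isEmpty then [] else [PySem.Str.join "" buf]) ++ pvEmit ts := by
  cases buf with
  | nil => simp
  | cons c l =>
    rw [List.map_cons, List.cons_append, pvEmit_ch, pvSpanChars_map_append,
      pvSpanChars_nonch ts h]
    simp

-- reductions of B's classifier under the same case split A's loop makes
theorem pvClassify_none (field : List (String × String))
    (hg : (PySem.Dict.mk field).get? "inferText" = none) : pvClassify field = PvTok.sep := by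
  unfold pvClassify; rw [hg]

theorem pvClassify_blank (field : List (String × String)) (text : String)
    (hg : (PySem.Dict.mk field).get? "inferText" = some text)
    (hs : PySem.Str.strip text = "") : pvClassify field = PvTok.sep := by
  unfold pvClassify; rw [hg]; simp only [if_pos hs]

theorem pvClassify_ch (field : List (String × String)) (text : String)
    (hg : (PySem.Dict.mk field).get? "inferText" = some text)
    (hs : ¬ PySem.Str.strip text = "")
    (hc : (PySem.Str.len (PySem.Str.strip text) == 1 && pyIsAscii (PySem.Str.strip text)
        && PySem.Str.strIsalnum (PySem.Str.strip text)) = true) :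
    pvClassify field = PvTok.ch (PySem.Str.strip text) := by
  unfold pvClassify; rw [hg]; simp only [if_neg hs, if_pos hc]

theorem pvClassify_word (field : List (String × String)) (text : String)
    (hg : (PySem.Dict.mk field).get? "inferText" = some text)
    (hs : ¬ PySem.Str.strip text = "")
    (hc : ¬ (PySem.Str.len (PySem.Str.strip text) == 1 && pyIsAscii (PySem.Str.strip text)
        && PySem.Str.strIsalnum (PySem.Str.strip text)) = true) :
    pvClassify field = PvTok.word (PySem.Str.strip text) := by
  unfold pvClassify; rw [hg]; simp only [if_neg hs, if_neg hc]

-- the loop invariant: A's loop is `result` followed by B's emit of buf-as-chars plus the classified rest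
theorem mergeA_loop_eq : ∀ (fields : List (List (String × String))) (result buf : List String),
    mergeA_loop fields result buf =
      result ++ pvEmit (buf.map PvTok.ch ++ fields.map pvClassify) := by
  intro fields
  induction fields with
  | nil =>
    intro result buf
    rw [mergeA_loop]
    simp only [List.map_nil, List.append_nil]
    rw [← List.append_nil (buf.map PvTok.ch), pvEmit_flush buf [] (Or.inl rfl)]
    cases buf <;> simp [pvEmit_nil]
  | cons field rest ih =>
    intro result buf
    rw [mergeA_loop]
    simp only [List.map_cons]
    cases hg : (PySem.Dict.mk field).get? "inferText" with
    | none =>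
      rw [ih, pvClassify_none field hg,
        pvEmit_flush buf _ (Or.inr (Or.inl ⟨_, rfl⟩)), pvEmit_sep]
      cases buf <;> simp
    | some text =>
      by_cases hs : PySem.Str.strip text = ""
      · simp only [if_pos hs]
        rw [ih, pvClassify_blank field text hg hs,
          pvEmit_flush buf _ (Or.inr (Or.inl ⟨_, rfl⟩)), pvEmit_sep]
        cases buf <;> simp
      · simp only [if_neg hs]
        by_cases hc : (PySem.Str.len (PySem.Str.strip text) == 1 && pyIsAscii (PySem.Str.strip text)
            && PySem.Str.strIsalnum (PySem.Str.strip text)) = true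
        · simp only [if_pos hc]
          rw [ih, pvClassify_ch field text hg hs hc]
          simp
        · simp only [if_neg hc]
          rw [ih, pvClassify_word field text hg hs hc,
            pvEmit_flush buf _ (Or.inr (Or.inr ⟨_, _, rfl⟩)), pvEmit_word]
          cases buf <;> simp

-- ===== VERDICT (by name: the statement is the Claim_ definition above) =====
theorem merge_single_char_fields_py_spec : Claim_equal_merge_single_char_fields_py := by
  intro fields _
  unfold Spec_merge_single_char_fields_py merge_single_char_fields_py merge_single_char_fields_py_alt
  rw [mergeA_loop_eq]
  simp
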